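-- pv_equiv track=rewrite | github.com/hanajjang25/study | 프로그래머스/1/42840. 모의고사/모의고사.py | solution
-- ===== SOURCE A (Python) =====
-- def solution(answers):
--     answer = []
--     math_1 = [1,2,3,4,5]
--     math_2 = [2,1,2,3,2,4,2,5]
--     math_3 = [3,3,1,1,2,2,4,4,5,5]
--
--     correct = [0, 0, 0]
--
--     for idx, i in enumerate(answers):
--         if i == math_1[idx % len(math_1)]:
--             correct[0] += 1
--         if i == math_2[idx % len(math_2)]:
--             correct[1] += 1
--         if i == math_3[idx % len(math_3)]:
--             correct[2] += 1
--
--     for idx, i in enumerate(correct):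
--         if i == max(correct):
--             answer.append(idx+1)
--
--     answer.sort()
--
--     return answer
-- ===== SOURCE B (Python) =====
-- def solution(answers):
--     patterns = [(1, [1, 2, 3, 4, 5]),
--                 (2, [2, 1, 2, 3, 2, 4, 2, 5]),
--                 (3, [3, 3, 1, 1, 2, 2, 4, 4, 5, 5])]
--     best, winners = -1, []
--     for num, base in patterns:
--         p = base
--         s = 0
--         for a in answers:
--             s += (a == p[0])
--             p = p[1:] + p[:1]          # rotate the pattern instead of modulo indexing
--         if s > best:
--             best, winners = s, [num]
--         elif s == best:
--             winners.append(num)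
--     return winners
-- ===== Notes on version B (the rewrite author's own statement) =====
-- stated objective: alternative
-- what changed: B drops A's enumerate/modulo indexing and its max-then-filter-then-sort finish: each pattern is consumed by rotating it one step per answer (compare against the rotating head, no index arithmetic), and the winners are kept with a running best/argmax accumulator over the three patterns instead of computing max(correct) and re-scanning and sorting.
import Mathlib
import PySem

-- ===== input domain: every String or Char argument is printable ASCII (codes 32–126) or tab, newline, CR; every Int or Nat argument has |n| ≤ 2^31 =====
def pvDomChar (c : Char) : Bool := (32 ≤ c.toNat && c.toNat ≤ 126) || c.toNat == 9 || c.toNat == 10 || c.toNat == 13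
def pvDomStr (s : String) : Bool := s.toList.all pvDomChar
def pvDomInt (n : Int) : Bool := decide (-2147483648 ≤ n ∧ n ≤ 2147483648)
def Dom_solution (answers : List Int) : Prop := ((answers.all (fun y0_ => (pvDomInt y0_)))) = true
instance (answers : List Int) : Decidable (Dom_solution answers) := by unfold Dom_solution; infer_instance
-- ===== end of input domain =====

-- B replaces A's enumerate/modulo indexing and max-then-filter-then-sort finish by rotating
-- each pattern one step per answer and a running best/argmax accumulator: an alternative algorithm.

-- ===== PORT A =====
def pat1A : List Int := [1, 2, 3, 4, 5]
def pat2A : List Int := [2, 1, 2, 3, 2, 4, 2, 5]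
def pat3A : List Int := [3, 3, 1, 1, 2, 2, 4, 4, 5, 5]

-- the 'for idx, i in enumerate(answers)' loop; indices are nonnegative so idx % len is a Nat index, always in range
def correctLoop : Nat → Int × Int × Int → List Int → Int × Int × Int
  | _, c, [] => c
  | idx, (c1, c2, c3), i :: rest =>
      correctLoop (idx + 1)
        ((if i = pat1A.getD (idx % 5) 0 then c1 + 1 else c1),
         (if i = pat2A.getD (idx % 8) 0 then c2 + 1 else c2),
         (if i = pat3A.getD (idx % 10) 0 then c3 + 1 else c3)) rest

-- the 'for idx, i in enumerate(correct)' appending loop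
def answerLoop (mx : Int) : Nat → List Int → List Int → List Int
  | _, acc, [] => acc
  | idx, acc, i :: rest =>
      answerLoop mx (idx + 1) (if i = mx then acc ++ [(idx : Int) + 1] else acc) rest

def solution (answers : List Int) : List Int :=
  let c := correctLoop 0 (0, 0, 0) answers
  let correct := [c.1, c.2.1, c.2.2]
  let mx := (PySem.List.max? correct (fun x => x)).getD 0  -- correct is a nonempty literal, max? is some
  PySem.List.sorted (answerLoop mx 0 [] correct) (fun x => x) false

-- ===== PORT B =====
-- the inner 'for a in answers' loop: state (p, s); p[0] is safe since p stays nonempty (length 5/8/10)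
def rotScoreLoop : List Int → Int → List Int → List Int × Int
  | p, s, [] => (p, s)
  | p, s, a :: rest =>
      rotScoreLoop (p.drop 1 ++ p.take 1)   -- p = p[1:] + p[:1]
        (s + if a = PySem.List.pyGetD p 0 0 then 1 else 0) rest

-- the outer 'for num, base in patterns' loop with the running (best, winners) accumulator
def solution_alt (answers : List Int) : List Int :=
  let patterns : List (Int × List Int) :=
    [(1, [1, 2, 3, 4, 5]), (2, [2, 1, 2, 3, 2, 4, 2, 5]), (3, [3, 3, 1, 1, 2, 2, 4, 4, 5, 5])]
  (patterns.foldl (fun (st : Int × List Int) nb =>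
      let s := (rotScoreLoop nb.2 0 answers).2
      if s > st.1 then (s, [nb.1])
      else if s = st.1 then (st.1, st.2 ++ [nb.1])
      else st)
    (-1, [])).2

-- ===== PRECONDITION & SPEC =====
def Spec_solution (answers : List Int) (out : List Int) : Prop := out = solution_alt answers
instance (answers : List Int) (out : List Int) : Decidable (Spec_solution answers out) := by unfold Spec_solution; infer_instance

-- ===== CLAIM =====
def Claim_equal_solution : Prop := ∀ (answers : List Int), Dom_solution answers → Spec_solution answers (solution answers)

-- ===== LEMMAS AND PROOFS =====

-- proof-side: the score of pattern p on l starting at index idx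
def sAux (p : List Int) : Nat → List Int → Int
  | _, [] => 0
  | idx, i :: rest => (if i = p.getD (idx % p.length) 0 then 1 else 0) + sAux p (idx + 1) rest

-- p rotated left by idx steps (depends only on idx % p.length)
def rotK (p : List Int) (idx : Nat) : List Int :=
  p.drop (idx % p.length) ++ p.take (idx % p.length)

theorem sAux_nonneg (p : List Int) : ∀ (idx : Nat) (l : List Int), 0 ≤ sAux p idx l := by
  intro idx l
  induction l generalizing idx with
  | nil => simp [sAux]
  | cons i rest ih =>
      have := ih (idx + 1)
      simp only [sAux]
      split_ifs <;> omega

theorem correctLoop_eq (l : List Int) : ∀ (idx : Nat) (c1 c2 c3 : Int),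
    correctLoop idx (c1, c2, c3) l =
      (c1 + sAux pat1A idx l, c2 + sAux pat2A idx l, c3 + sAux pat3A idx l) := by
  induction l with
  | nil => intro idx c1 c2 c3; simp [correctLoop, sAux]
  | cons i rest ih =>
      intro idx c1 c2 c3
      simp only [correctLoop, sAux, ih, pat1A, pat2A, pat3A, List.length_cons, List.length_nil]
      split_ifs <;> simp [add_assoc]

theorem rotScoreLoop_eq (p : List Int)
    (hhead : ∀ n : Nat, (rotK p n).getD 0 0 = p.getD (n % p.length) 0)
    (hrot : ∀ n : Nat, (rotK p n).drop 1 ++ (rotK p n).take 1 = rotK p (n + 1)) :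
    ∀ (l : List Int) (n : Nat) (s : Int),
      (rotScoreLoop (rotK p n) s l).2 = s + sAux p n l := by
  intro l
  induction l with
  | nil => intro n s; simp [rotScoreLoop, sAux]
  | cons a rest ih =>
      intro n s
      simp only [rotScoreLoop, PySem.List.pyGetD_zero, hhead, hrot, ih, sAux]
      split_ifs <;> ring

-- final stage: A's max / filter / sort equals B's running-best fold, for a nonnegative first score
set_option maxHeartbeats 1600000 in
theorem pick_eq (s1 s2 s3 : Int) (h1 : 0 ≤ s1) :
    PySem.List.sorted
      (answerLoop ((PySem.List.max? [s1, s2, s3] (fun x => x)).getD 0) 0 [] [s1, s2, s3])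
      (fun x => x) false =
    ([(1, s1), (2, s2), (3, s3)].foldl (fun (st : Int × List Int) nb =>
        if nb.2 > st.1 then (nb.2, [nb.1])
        else if nb.2 = st.1 then (st.1, st.2 ++ [nb.1])
        else st) ((-1 : Int), ([] : List Int))).2 := by
  rcases h : PySem.List.max? [s1, s2, s3] (fun x => x) with _ | M
  · exact absurd ((PySem.List.max?_eq_none_iff _ _).mp h) (by simp)
  · have hmem : M = s1 ∨ M = s2 ∨ M = s3 := by
      have := PySem.List.max?_mem h
      simpa using this
    have hle1 : s1 ≤ M := PySem.List.max?_isMax h s1 (by simp)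
    have hle2 : s2 ≤ M := PySem.List.max?_isMax h s2 (by simp)
    have hle3 : s3 ≤ M := PySem.List.max?_isMax h s3 (by simp)
    simp only [Option.getD_some, answerLoop, List.foldl]
    rcases hmem with hM | hM | hM <;> split_ifs <;> first | omega | (simp; decide)

-- ===== VERDICT =====
theorem solution_spec : Claim_equal_solution := by
  intro answers _
  unfold Spec_solution solution solution_alt
  have e1 : (rotScoreLoop [1, 2, 3, 4, 5] 0 answers).2 = sAux pat1A 0 answers := by
    rw [show ([1, 2, 3, 4, 5] : List Int) = rotK pat1A 0 from (by simp [rotK, pat1A])]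
    rw [rotScoreLoop_eq pat1A ?hh ?hr]
    · omega
    case hh =>
      intro n
      have h : n % pat1A.length < 5 := Nat.mod_lt _ (by decide)
      simp only [rotK]
      generalize n % pat1A.length = m at h ⊢
      interval_cases m <;> decide
    case hr =>
      intro n
      have heq : (n + 1) % pat1A.length = (n % pat1A.length + 1) % pat1A.length := by
        simp only [pat1A, List.length_cons, List.length_nil]; omega
      have h : n % pat1A.length < 5 := Nat.mod_lt _ (by decide)
      simp only [rotK, heq]
      generalize n % pat1A.length = m at h ⊢
      interval_cases m <;> decide
  have e2 : (rotScoreLoop [2, 1, 2, 3, 2, 4, 2, 5] 0 answers).2 = sAux pat2A 0 answers := by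
    rw [show ([2, 1, 2, 3, 2, 4, 2, 5] : List Int) = rotK pat2A 0 from (by simp [rotK, pat2A])]
    rw [rotScoreLoop_eq pat2A ?hh ?hr]
    · omega
    case hh =>
      intro n
      have h : n % pat2A.length < 8 := Nat.mod_lt _ (by decide)
      simp only [rotK]
      generalize n % pat2A.length = m at h ⊢
      interval_cases m <;> decide
    case hr =>
      intro n
      have heq : (n + 1) % pat2A.length = (n % pat2A.length + 1) % pat2A.length := by
        simp only [pat2A, List.length_cons, List.length_nil]; omega
      have h : n % pat2A.length < 8 := Nat.mod_lt _ (by decide)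
      simp only [rotK, heq]
      generalize n % pat2A.length = m at h ⊢
      interval_cases m <;> decide
  have e3 : (rotScoreLoop [3, 3, 1, 1, 2, 2, 4, 4, 5, 5] 0 answers).2 = sAux pat3A 0 answers := by
    rw [show ([3, 3, 1, 1, 2, 2, 4, 4, 5, 5] : List Int) = rotK pat3A 0 from (by simp [rotK, pat3A])]
    rw [rotScoreLoop_eq pat3A ?hh ?hr]
    · omega
    case hh =>
      intro n
      have h : n % pat3A.length < 10 := Nat.mod_lt _ (by decide)
      simp only [rotK]
      generalize n % pat3A.length = m at h ⊢
      interval_cases m <;> decide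
    case hr =>
      intro n
      have heq : (n + 1) % pat3A.length = (n % pat3A.length + 1) % pat3A.length := by
        simp only [pat3A, List.length_cons, List.length_nil]; omega
      have h : n % pat3A.length < 10 := Nat.mod_lt _ (by decide)
      simp only [rotK, heq]
      generalize n % pat3A.length = m at h ⊢
      interval_cases m <;> decide
  rw [correctLoop_eq]
  simp only [List.foldl, e1, e2, e3, zero_add]
  exact pick_eq _ _ _ (sAux_nonneg _ _ _)
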